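-- pv_equiv track=rewrite | github.com/kaluginpeter/Algorithms_and_structures_tasks | CodeWars/7kyu/Down_Arrow_With_Numbers.py | get_a_down_arrow_of
-- ===== SOURCE A (Python) =====
-- def get_a_down_arrow_of(n):
--     if n < 1:
--         return ''
--     ans: list[str] = list()
--     for i in range(n, 0, -1):
--         x: str = ' '* (n - i)
--         x += ''.join(str(j)[-1] for j in range(1, i + 1))
--         x += ''.join(str(j)[-1] for j in range(i - 1, 0, -1))
--         ans.append(x)
--     return '\n'.join(ans)
-- ===== SOURCE B (Python) =====
-- def get_a_down_arrow_of(n):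
--     if n < 1:
--         return ''
--     core = ''
--     rows = []
--     for i in range(1, n + 1):
--         core += str(i)[-1]
--         rows.append(' ' * (n - i) + core + core[:-1][::-1])
--     rows.reverse()
--     return '\n'.join(rows)
-- ===== Notes on version B (the rewrite author's own statement) =====
-- stated objective: simpler
-- what changed: B keeps one running 'core' string of last digits, building each row as spaces + core + reversed mirror of core[:-1] and reversing the row list at the end, instead of A recomputing both an ascending and a descending range scan per row.
import Mathlib
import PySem

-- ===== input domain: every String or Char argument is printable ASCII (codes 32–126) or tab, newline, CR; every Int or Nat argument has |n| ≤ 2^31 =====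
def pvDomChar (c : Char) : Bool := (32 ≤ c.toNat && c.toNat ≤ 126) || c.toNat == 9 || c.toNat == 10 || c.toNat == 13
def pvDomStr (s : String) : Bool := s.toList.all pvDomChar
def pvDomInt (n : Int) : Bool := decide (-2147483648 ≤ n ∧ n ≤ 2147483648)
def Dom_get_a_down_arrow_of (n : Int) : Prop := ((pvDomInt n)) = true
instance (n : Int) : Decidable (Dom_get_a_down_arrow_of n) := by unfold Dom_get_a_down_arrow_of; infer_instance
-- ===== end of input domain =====

-- B builds each row from a running 'core' prefix and its mirror instead of two per-row range scans; objective: simpler.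

-- str(j)[-1] as both Pythons write it; the none branch is Python's IndexError, unreachable since str(j) ≠ ''
def pvLastDig (j : Int) : List Char :=
  match PySem.List.pyGet? (PySem.Int.toChars j) (-1) with
  | some c => [c]
  | none => []

-- ===== PORT A =====
def get_a_down_arrow_of (n : Int) : String :=
  if n < 1 then "" else
    let ans : List (List Char) :=
      (PySem.List.pyRange n 0 (-1)).foldl (fun acc i =>
        let x := PySem.List.pyRepeat [' '] (n - i)
        let x := x ++ PySem.Chars.join [] ((PySem.List.pyRange 1 (i + 1) 1).map pvLastDig)
        let x := x ++ PySem.Chars.join [] ((PySem.List.pyRange (i - 1) 0 (-1)).map pvLastDig)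
        acc ++ [x]) []
    String.ofList (PySem.Chars.join ['\n'] ans)

-- ===== PORT B =====
def get_a_down_arrow_of_alt (n : Int) : String :=
  if n < 1 then "" else
    let st :=
      (PySem.List.pyRange 1 (n + 1) 1).foldl
        (fun (st : List Char × List (List Char)) i =>
          let core := st.1 ++ pvLastDig i
          -- core[:-1][::-1]; the getD is Python's step ≠ 0 guard, never taken for step -1
          let mirror := (PySem.List.slice? (PySem.List.slice core none (some (-1))) none none (-1)).getD []
          (core, st.2 ++ [PySem.List.pyRepeat [' '] (n - i) ++ core ++ mirror]))
        ([], [])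
    String.ofList (PySem.Chars.join ['\n'] st.2.reverse)

-- ===== PRECONDITION & SPEC =====
def Spec_get_a_down_arrow_of (n : Int) (out : String) : Prop := out = get_a_down_arrow_of_alt n
instance (n : Int) (out : String) : Decidable (Spec_get_a_down_arrow_of n out) := by unfold Spec_get_a_down_arrow_of; infer_instance

-- ===== CLAIM (what is proved, stated in full; the proofs are below) =====
def Claim_equal_get_a_down_arrow_of : Prop := ∀ (n : Int), Dom_get_a_down_arrow_of n → Spec_get_a_down_arrow_of n (get_a_down_arrow_of n)

-- ===== LEMMAS AND PROOFS =====

theorem pvToDigitsCore_ne_nil (b fuel n : Nat) (ds : List Char) (h : 0 < fuel ∨ ds ≠ []) :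
    Nat.toDigitsCore b fuel n ds ≠ [] := by
  induction fuel generalizing n ds with
  | zero =>
    rcases h with h | h
    · omega
    · simpa [Nat.toDigitsCore] using h
  | succ fuel ih =>
    rw [Nat.toDigitsCore]
    split
    · simp
    · exact ih _ _ (Or.inr (by simp))

theorem pvToChars_ne_nil (j : Int) : PySem.Int.toChars j ≠ [] := by
  unfold PySem.Int.toChars
  split
  · simp
  · rw [Nat.toDigits]
    exact pvToDigitsCore_ne_nil _ _ _ _ (Or.inl (by omega))

-- the last character of str(j)
def pvLastC (j : Int) : Char := ((PySem.Int.toChars j).getLast?).getD ' '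

theorem pvLastDig_eq (j : Int) : pvLastDig j = [pvLastC j] := by
  unfold pvLastDig pvLastC
  rw [PySem.List.pyGet?_neg_one]
  rcases h : (PySem.Int.toChars j).getLast? with _ | c
  · exact absurd (List.getLast?_eq_none_iff.mp h) (pvToChars_ne_nil j)
  · simp

theorem pvJoin_map (l : List Int) :
    PySem.Chars.join [] (l.map pvLastDig) = l.map pvLastC := by
  have : l.map pvLastDig = (l.map pvLastC).map (fun c => [c]) := by
    rw [List.map_map]; exact List.map_congr_left (fun i _ => pvLastDig_eq i)
  rw [this, PySem.Chars.join_nil_singletons]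

-- the row both programs build for index i
def pvRow (n i : Int) : List Char :=
  PySem.List.pyRepeat [' '] (n - i) ++ ((PySem.List.pyRange 1 (i + 1) 1).map pvLastC)
    ++ ((PySem.List.pyRange 1 (i + 1) 1).map pvLastC).dropLast.reverse

theorem pvRowA_eq (n i : Int) (hi : 1 ≤ i) :
    PySem.List.pyRepeat [' '] (n - i)
      ++ PySem.Chars.join [] ((PySem.List.pyRange 1 (i + 1) 1).map pvLastDig)
      ++ PySem.Chars.join [] ((PySem.List.pyRange (i - 1) 0 (-1)).map pvLastDig)
    = pvRow n i := by
  unfold pvRow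
  rw [pvJoin_map, pvJoin_map]
  congr 1
  have h1 : PySem.List.pyRange (i - 1) 0 (-1) = (PySem.List.pyRange 1 i 1).reverse := by
    have := PySem.List.pyRange_neg_one_eq_reverse (i - 1) 0
    simpa using this
  have h2 : (PySem.List.pyRange 1 (i + 1) 1).map pvLastC
      = (PySem.List.pyRange 1 i 1).map pvLastC ++ [pvLastC i] := by
    rw [PySem.List.pyRange_one_succ_right hi, List.map_append]; simp
  rw [h1, h2, List.map_reverse]
  simp

-- one step of B's loop keeps core = map pvLastC over the range processed so far
theorem pvBfold (n : Int) (m : Nat) :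
    (PySem.List.pyRange 1 ((m : Int) + 1) 1).foldl
      (fun (st : List Char × List (List Char)) i =>
        let core := st.1 ++ pvLastDig i
        let mirror := (PySem.List.slice? (PySem.List.slice core none (some (-1))) none none (-1)).getD []
        (core, st.2 ++ [PySem.List.pyRepeat [' '] (n - i) ++ core ++ mirror]))
      ([], [])
    = ((PySem.List.pyRange 1 ((m : Int) + 1) 1).map pvLastC,
       (PySem.List.pyRange 1 ((m : Int) + 1) 1).map (pvRow n)) := by
  induction m with
  | zero => simp [PySem.List.pyRange_one_eq_nil]
  | succ m ih =>
    have hsplit : PySem.List.pyRange 1 ((m : Int) + 1 + 1) 1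
        = PySem.List.pyRange 1 ((m : Int) + 1) 1 ++ [(m : Int) + 1] := by
      exact PySem.List.pyRange_one_succ_right (by omega)
    push_cast
    rw [hsplit, List.foldl_append, ih, List.map_append, List.map_append]
    simp only [List.foldl_cons, List.foldl_nil, List.map_cons, List.map_nil, Prod.mk.injEq]
    constructor
    · rw [pvLastDig_eq]
    · congr 1
      rw [pvLastDig_eq]
      unfold pvRow
      have hcore : (PySem.List.pyRange 1 ((m : Int) + 1) 1).map pvLastC ++ [pvLastC ((m : Int) + 1)]
          = (PySem.List.pyRange 1 ((m : Int) + 1 + 1) 1).map pvLastC := by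
        rw [hsplit, List.map_append]; simp
      rw [hcore]
      rw [PySem.List.slice_to_neg_one, PySem.List.slice?_none_none_neg_one]
      simp

-- ===== VERDICT (by name: the statement is the Claim_ definition above) =====
theorem get_a_down_arrow_of_spec : Claim_equal_get_a_down_arrow_of := by
  intro n _
  unfold Spec_get_a_down_arrow_of get_a_down_arrow_of get_a_down_arrow_of_alt
  by_cases h : n < 1
  · simp [h]
  · simp only [h, if_false]
    obtain ⟨m, rfl⟩ : ∃ m : Nat, n = (m : Int) :=
      ⟨n.toNat, (Int.toNat_of_nonneg (by omega)).symm⟩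
    rw [pvBfold]
    simp only
    congr 1
    rw [PySem.List.foldl_append_singleton_eq_map, List.nil_append]
    have hrev : PySem.List.pyRange (m : Int) 0 (-1)
        = (PySem.List.pyRange 1 ((m : Int) + 1) 1).reverse := by
      simpa using PySem.List.pyRange_neg_one_eq_reverse (m : Int) 0
    rw [hrev, List.map_reverse]
    refine congrArg (PySem.Chars.join ['\n']) (congrArg List.reverse (List.map_congr_left (fun i hi => ?_)))
    have := (PySem.List.mem_pyRange_one).mp hi
    exact pvRowA_eq (m : Int) i (by omega)
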